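-- pv_equiv track=rewrite | github.com/liammccon/Typing-Speed-Test | venv/file_help_typing_test.py | string_to_word_char_list
-- ===== SOURCE A (Python) =====
-- def string_to_word_char_list(string):
--     if isinstance(string, list): #for redundancy and simplicity :)
--         return string
--     elif not isinstance(string, str):
--         raise TypeError('Need to enter a string')
--     string = string + ' ' #needed to add the last word of each string
--     index = 0
--     words_letters = []
--     new_word = []
--     while  index < len(string):
--         current_letter = string[index: index + 1]
--         if string[index: index + 1] == ' ':
--             if new_word:
--                 words_letters.append(new_word)
--                 new_word = []
--         else: new_word.append(current_letter)
--         index += 1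
--     return words_letters
-- ===== SOURCE B (Python) =====
-- def string_to_word_char_list(string):
--     if isinstance(string, list):
--         return string
--     elif not isinstance(string, str):
--         raise TypeError('Need to enter a string')
--     return [list(word) for word in string.split(' ') if word]
-- ===== Notes on version B (the rewrite author's own statement) =====
-- stated objective: simpler
-- what changed: Replaces the explicit index loop with two accumulators by a single comprehension over the library single-space split that keeps non-empty words and explodes each into its characters.
import Mathlib
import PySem

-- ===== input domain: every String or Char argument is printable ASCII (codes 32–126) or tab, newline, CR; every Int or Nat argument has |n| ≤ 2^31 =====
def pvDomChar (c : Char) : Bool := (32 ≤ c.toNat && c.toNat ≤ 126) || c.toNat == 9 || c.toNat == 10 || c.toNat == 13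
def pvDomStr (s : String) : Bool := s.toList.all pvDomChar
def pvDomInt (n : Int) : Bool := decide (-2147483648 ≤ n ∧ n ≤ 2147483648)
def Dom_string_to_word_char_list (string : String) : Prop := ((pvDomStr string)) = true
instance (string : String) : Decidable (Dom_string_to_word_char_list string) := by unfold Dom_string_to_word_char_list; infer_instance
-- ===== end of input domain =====

-- B changes A's index scan with two accumulators into a comprehension over string.split(' '): simpler, same cost.
-- The Lean signature fixes the argument to String, so A's list-passthrough and TypeError branches are outside the port's domain.

-- ===== PORT A =====
-- A's while loop over indices, ported as structural recursion over the characters of (string + ' ');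
-- s[index:index+1] with index < len(s) is exactly the one-character string String.ofList [c].
def stwLoop (cs : List Char) (words_letters : List (List String)) (new_word : List String) :
    List (List String) :=
  match cs with
  | [] => words_letters
  | c :: rest =>
    if c = ' ' then
      if new_word ≠ [] then stwLoop rest (words_letters ++ [new_word]) []
      else stwLoop rest words_letters []
    else stwLoop rest words_letters (new_word ++ [String.ofList [c]])

def string_to_word_char_list (string : String) : List (List String) :=
  stwLoop (string.toList ++ [' ']) [] []

-- ===== PORT B =====
-- Source B: [list(word) for word in string.split(' ') if word]
def string_to_word_char_list_alt (string : String) : List (List String) :=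
  ((PySem.Chars.splitOn string.toList [' ']).filter (fun w => w ≠ [])).map
    (fun w => w.map (fun c => String.ofList [c]))

-- ===== PRECONDITION & SPEC =====
def Spec_string_to_word_char_list (string : String) (out : List (List String)) : Prop := out = string_to_word_char_list_alt string
instance (string : String) (out : List (List String)) : Decidable (Spec_string_to_word_char_list string out) := by unfold Spec_string_to_word_char_list; infer_instance

-- ===== CLAIM (what is proved, stated in full; the proofs are below) =====
def Claim_equal_string_to_word_char_list : Prop := ∀ (string : String), Dom_string_to_word_char_list string → Spec_string_to_word_char_list string (string_to_word_char_list string)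

-- ===== LEMMAS AND PROOFS =====

-- Reference split on a single space, with the pending (already reversed) prefix `pre`.
def spSplit (pre : List Char) (l : List Char) : List (List Char) :=
  match l with
  | [] => [pre]
  | c :: rest => if c = ' ' then pre :: spSplit [] rest else spSplit (pre ++ [c]) rest

theorem splitOn_go_space (fuel : Nat) (l cur : List Char) (acc : List (List Char))
    (h : l.length < fuel) :
    PySem.Chars.splitOn.go [' '] fuel l cur acc = acc.reverse ++ spSplit cur.reverse l := by
  induction fuel generalizing l cur acc with
  | zero => omega
  | succ f ih =>
    cases l with
    | nil => simp [PySem.Chars.splitOn.go, spSplit]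
    | cons c rest =>
      by_cases hc : c = ' '
      · subst hc
        have hstep : PySem.Chars.splitOn.go [' '] (f + 1) (' ' :: rest) cur acc =
            PySem.Chars.splitOn.go [' '] f rest [] (cur.reverse :: acc) := by
          simp [PySem.Chars.splitOn.go, List.isPrefixOf]
        rw [hstep, ih rest [] (cur.reverse :: acc) (by simpa using Nat.lt_of_succ_lt_succ h)]
        simp [spSplit]
      · have hpre : ([' '].isPrefixOf (c :: rest)) = false := by
          simp [List.isPrefixOf]
          exact fun hb => hc hb.symm
        have hstep : PySem.Chars.splitOn.go [' '] (f + 1) (c :: rest) cur acc =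
            PySem.Chars.splitOn.go [' '] f rest (c :: cur) acc := by
          simp [PySem.Chars.splitOn.go, hpre]
        rw [hstep, ih rest (c :: cur) acc (by simpa using Nat.lt_of_succ_lt_succ h)]
        simp [spSplit, hc]

theorem splitOn_space (cs : List Char) :
    PySem.Chars.splitOn cs [' '] = spSplit [] cs := by
  have := splitOn_go_space (cs.length + 1) cs [] [] (by omega)
  simpa [PySem.Chars.splitOn] using this

def charify (w : List Char) : List String := w.map (fun c => String.ofList [c])

theorem stwLoop_spec (cs : List Char) (words : List (List String)) (pre : List Char) :
    stwLoop (cs ++ [' ']) words (charify pre) =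
      words ++ ((spSplit pre cs).filter (fun w => w ≠ [])).map charify := by
  induction cs generalizing words pre with
  | nil =>
    by_cases hp : pre = []
    · subst hp; simp [stwLoop, spSplit, charify]
    · have : charify pre ≠ [] := by simp [charify, hp]
      simp [stwLoop, spSplit, this, hp, charify]
  | cons c rest ih =>
    by_cases hc : c = ' '
    · subst hc
      by_cases hp : pre = []
      · subst hp
        have h0 : charify ([] : List Char) = [] := rfl
        simp only [List.cons_append, stwLoop, if_pos rfl, h0, ne_eq, not_true_eq_false,
          if_false, ite_self]
        rw [← h0, ih]
        simp [spSplit]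
      · have hne : charify pre ≠ [] := by simp [charify, hp]
        simp only [List.cons_append, stwLoop, if_pos rfl, hne, ne_eq, not_false_eq_true, if_true]
        have h0 : charify ([] : List Char) = [] := rfl
        rw [← h0, ih]
        simp [spSplit, hp, charify]
    · have hcf : charify pre ++ [String.ofList [c]] = charify (pre ++ [c]) := by simp [charify]
      simp only [List.cons_append, stwLoop, if_neg hc, hcf]
      rw [ih]
      simp [spSplit, hc]

-- ===== VERDICT (by name: the statement is the Claim_ definition above) =====
theorem string_to_word_char_list_spec : Claim_equal_string_to_word_char_list := by
  intro s _
  unfold Spec_string_to_word_char_list string_to_word_char_list string_to_word_char_list_alt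
  rw [splitOn_space]
  have h0 : charify ([] : List Char) = [] := rfl
  rw [← h0, stwLoop_spec s.toList [] []]
  simp [charify]
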